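-- pv_equiv track=rewrite | github.com/FenilRF/AI-Test_Case-Defect-Prediction_System | backend/app/services/complexity_scorer.py | score_complexity
-- ===== SOURCE A (Python) =====
-- from typing import Dict, Any
--
-- _LEVEL_5_KEYWORDS = {
--     "concurrent", "race condition", "deadlock", "performance", "load",
--     "stress", "injection", "xss", "csrf", "encryption", "ssl",
--     "system crash", "recovery", "data corruption", "memory leak",
-- }
--
-- _LEVEL_4_KEYWORDS = {
--     "integration", "api", "database", "cross-module", "service",
--     "external", "third-party", "authentication", "authorization",
--     "token", "session", "middleware", "retry", "timeout",
--     "webhook", "gateway", "queue", "kafka", "redis",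
-- }
--
-- _LEVEL_3_KEYWORDS = {
--     "workflow", "state transition", "multi-step", "end-to-end",
--     "status change", "approval", "rejection", "lifecycle",
--     "sequence", "chain", "pipeline", "batch", "process flow",
--     "role-based", "permission", "admin", "user journey",
-- }
--
-- def score_complexity(test_case: Dict[str, Any]) -> int:
--     """
--     Compute complexity score (1–5) for a test case.
--
--     Uses test_type, scenario text, and test_level as signals.
--     """
--     scenario_lower = test_case.get("scenario", "").lower()
--     test_type = test_case.get("test_type", "").lower()
--     test_level = test_case.get("test_level", "Unit").lower()
--
--     # Start with base score from test_type
--     if test_type == "security":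
--         score = 4
--     elif test_type == "edge":
--         score = 3
--     elif test_type == "boundary":
--         score = 2
--     elif test_type == "negative":
--         score = 2
--     else:
--         score = 1  # positive
--
--     # Elevate based on keyword detection
--     if any(kw in scenario_lower for kw in _LEVEL_5_KEYWORDS):
--         score = max(score, 5)
--     elif any(kw in scenario_lower for kw in _LEVEL_4_KEYWORDS):
--         score = max(score, 4)
--     elif any(kw in scenario_lower for kw in _LEVEL_3_KEYWORDS):
--         score = max(score, 3)
--
--     # Elevate based on test_level
--     level_boost = {
--         "unit": 0,
--         "integration": 1,
--         "system": 2,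
--         "uat": 1,
--     }
--     score = min(score + level_boost.get(test_level, 0), 5)
--
--     return score
-- ===== SOURCE B (Python) =====
-- _LEVEL_5_KEYWORDS = {
--     "concurrent", "race condition", "deadlock", "performance", "load",
--     "stress", "injection", "xss", "csrf", "encryption", "ssl",
--     "system crash", "recovery", "data corruption", "memory leak",
-- }
--
-- _LEVEL_4_KEYWORDS = {
--     "integration", "api", "database", "cross-module", "service",
--     "external", "third-party", "authentication", "authorization",
--     "token", "session", "middleware", "retry", "timeout",
--     "webhook", "gateway", "queue", "kafka", "redis",
-- }
--
-- _LEVEL_3_KEYWORDS = {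
--     "workflow", "state transition", "multi-step", "end-to-end",
--     "status change", "approval", "rejection", "lifecycle",
--     "sequence", "chain", "pipeline", "batch", "process flow",
--     "role-based", "permission", "admin", "user journey",
-- }
--
-- _TIERS = [(5, _LEVEL_5_KEYWORDS), (4, _LEVEL_4_KEYWORDS), (3, _LEVEL_3_KEYWORDS)]
-- _BASE_SCORE = {"security": 4, "edge": 3, "boundary": 2, "negative": 2}
-- _LEVEL_BOOST = {"unit": 0, "integration": 1, "system": 2, "uat": 1}
--
--
-- def score_complexity(test_case):
--     """Top-down search: return the highest score in 5..2 that is reachable,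
--     i.e. whose required pre-boost level is met by the base score or by some
--     matching keyword tier; otherwise 1."""
--     scenario_lower = test_case.get("scenario", "").lower()
--     base = _BASE_SCORE.get(test_case.get("test_type", "").lower(), 1)
--     boost = _LEVEL_BOOST.get(test_case.get("test_level", "Unit").lower(), 0)
--     for ans in range(5, 1, -1):
--         need = ans - boost
--         if base >= need or any(
--             tier >= need and any(kw in scenario_lower for kw in kws)
--             for tier, kws in _TIERS
--         ):
--             return ans
--     return 1
-- ===== Notes on version B (the rewrite author's own statement) =====
-- stated objective: alternative
-- what changed: B replaces A's arithmetic pipeline (base score, three-stage keyword-cascade max, capped level boost) by a top-down search over the candidate scores 5..2, returning the first score whose reachability predicate (base or some matching keyword tier meets the boost-adjusted requirement) holds, else 1.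
import Mathlib
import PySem

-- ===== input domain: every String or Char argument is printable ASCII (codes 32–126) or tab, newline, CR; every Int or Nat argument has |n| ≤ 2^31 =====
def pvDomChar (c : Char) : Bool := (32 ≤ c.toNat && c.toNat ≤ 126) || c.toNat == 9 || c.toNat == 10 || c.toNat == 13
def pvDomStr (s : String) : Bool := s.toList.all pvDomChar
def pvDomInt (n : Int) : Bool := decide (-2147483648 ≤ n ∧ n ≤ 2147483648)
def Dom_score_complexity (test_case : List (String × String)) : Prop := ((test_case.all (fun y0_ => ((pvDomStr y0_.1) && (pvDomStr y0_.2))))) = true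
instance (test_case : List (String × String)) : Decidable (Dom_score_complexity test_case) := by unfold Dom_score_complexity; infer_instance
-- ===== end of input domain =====

-- B replaces A's arithmetic pipeline by a top-down search over candidate scores 5..2 with a reachability predicate (alternative decomposition, same cost).

-- module-level keyword sets (shared constants of the Python module; any-membership is order-independent)
def level5Keywords : List String :=
  ["concurrent", "race condition", "deadlock", "performance", "load",
   "stress", "injection", "xss", "csrf", "encryption", "ssl",
   "system crash", "recovery", "data corruption", "memory leak"]

def level4Keywords : List String :=
  ["integration", "api", "database", "cross-module", "service",
   "external", "third-party", "authentication", "authorization",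
   "token", "session", "middleware", "retry", "timeout",
   "webhook", "gateway", "queue", "kafka", "redis"]

def level3Keywords : List String :=
  ["workflow", "state transition", "multi-step", "end-to-end",
   "status change", "approval", "rejection", "lifecycle",
   "sequence", "chain", "pipeline", "batch", "process flow",
   "role-based", "permission", "admin", "user journey"]

-- ===== PORT A =====
def score_complexity (test_case : List (String × String)) : Int :=
  let d := PySem.Dict.mk test_case
  let scenario_lower := PySem.Str.lower (d.getD "scenario" "")
  let test_type := PySem.Str.lower (d.getD "test_type" "")
  let test_level := PySem.Str.lower (d.getD "test_level" "Unit")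
  let score : Int :=
    if test_type == "security" then 4
    else if test_type == "edge" then 3
    else if test_type == "boundary" then 2
    else if test_type == "negative" then 2
    else 1
  let score : Int :=
    if level5Keywords.any (fun kw => PySem.Str.isIn kw scenario_lower) then max score 5
    else if level4Keywords.any (fun kw => PySem.Str.isIn kw scenario_lower) then max score 4
    else if level3Keywords.any (fun kw => PySem.Str.isIn kw scenario_lower) then max score 3
    else score
  let level_boost : PySem.Dict String Int :=
    PySem.Dict.mk [("unit", 0), ("integration", 1), ("system", 2), ("uat", 1)]
  min (score + level_boost.getD test_level 0) 5

-- ===== PORT B =====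
def tiers : List (Int × List String) :=
  [(5, level5Keywords), (4, level4Keywords), (3, level3Keywords)]

def baseScoreDict : PySem.Dict String Int :=
  PySem.Dict.mk [("security", 4), ("edge", 3), ("boundary", 2), ("negative", 2)]

def levelBoostDict : PySem.Dict String Int :=
  PySem.Dict.mk [("unit", 0), ("integration", 1), ("system", 2), ("uat", 1)]

-- 'for ans in range(5,1,-1): if reachable: return ans' / 'return 1' = first match in the range, else 1
def score_complexity_alt (test_case : List (String × String)) : Int :=
  let d := PySem.Dict.mk test_case
  let scenario_lower := PySem.Str.lower (d.getD "scenario" "")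
  let base := baseScoreDict.getD (PySem.Str.lower (d.getD "test_type" "")) 1
  let boost := levelBoostDict.getD (PySem.Str.lower (d.getD "test_level" "Unit")) 0
  ((PySem.List.pyRange 5 1 (-1)).find? (fun ans =>
      decide (base ≥ ans - boost) ||
      tiers.any (fun t =>
        decide (t.1 ≥ ans - boost) &&
        t.2.any (fun kw => PySem.Str.isIn kw scenario_lower)))).getD 1

-- ===== PRECONDITION & SPEC =====
def Spec_score_complexity (test_case : List (String × String)) (out : Int) : Prop := out = score_complexity_alt test_case
instance (test_case : List (String × String)) (out : Int) : Decidable (Spec_score_complexity test_case out) := by unfold Spec_score_complexity; infer_instance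

-- ===== CLAIM (what is proved, stated in full; the proofs are below) =====
def Claim_equal_score_complexity : Prop := ∀ (test_case : List (String × String)), Dom_score_complexity test_case → Spec_score_complexity test_case (score_complexity test_case)

-- ===== LEMMAS AND PROOFS =====

-- core arithmetic fact: A's combine = B's descending search, for any base in 1..4, boost in 0..2
theorem core (b bo : Int) (a5 a4 a3 : Bool)
    (hb1 : 1 ≤ b) (hb4 : b ≤ 4) (hbo0 : 0 ≤ bo) (hbo2 : bo ≤ 2) :
    min ((if a5 then max b 5 else if a4 then max b 4 else if a3 then max b 3 else b) + bo) 5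
    = ((([5, 4, 3, 2] : List Int).find? (fun ans =>
        decide (b ≥ ans - bo) ||
        ((decide ((5 : Int) ≥ ans - bo) && a5) ||
         ((decide ((4 : Int) ≥ ans - bo) && a4) ||
          (decide ((3 : Int) ≥ ans - bo) && a3))))).getD 1) := by
  cases a5 <;> cases a4 <;> cases a3 <;>
    simp only [List.find?, Bool.and_true, Bool.and_false, Bool.or_false, Bool.false_or] <;>
    (repeat' split) <;> simp_all <;> omega

-- the base-score dict lookup equals A's if-chain
theorem base_eq (tt : String) :
    baseScoreDict.getD tt 1
    = (if tt == "security" then (4 : Int) else if tt == "edge" then 3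
       else if tt == "boundary" then 2 else if tt == "negative" then 2 else 1) := by
  simp only [baseScoreDict, PySem.Dict.getD_eq_get?_getD, PySem.Dict.get?,
    List.find?]
  (repeat' split) <;> simp_all [BEq.comm]

-- the boost lookup is one of 0, 1, 2
theorem boost_mem (tl : String) :
    (PySem.Dict.mk [("unit", (0:Int)), ("integration", 1), ("system", 2), ("uat", 1)]).getD tl 0 = 0
    ∨ (PySem.Dict.mk [("unit", (0:Int)), ("integration", 1), ("system", 2), ("uat", 1)]).getD tl 0 = 1
    ∨ (PySem.Dict.mk [("unit", (0:Int)), ("integration", 1), ("system", 2), ("uat", 1)]).getD tl 0 = 2 := by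
  simp only [PySem.Dict.getD_eq_get?_getD, PySem.Dict.get?, List.find?]
  (repeat' split) <;> simp

-- ===== VERDICT (by name: the statement is the Claim_ definition above) =====
set_option maxHeartbeats 1000000 in
theorem score_complexity_spec : Claim_equal_score_complexity := by
  intro tc _
  unfold Spec_score_complexity score_complexity score_complexity_alt
  dsimp only
  rw [base_eq, show PySem.List.pyRange 5 1 (-1) = ([5, 4, 3, 2] : List Int) from by decide]
  simp only [tiers, List.any_cons, List.any_nil, Bool.or_false]
  have hbrng : 1 ≤ (if (PySem.Str.lower ((PySem.Dict.mk tc).getD "test_type" "") == "security") = true then (4:Int)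
      else if (PySem.Str.lower ((PySem.Dict.mk tc).getD "test_type" "") == "edge") = true then 3
      else if (PySem.Str.lower ((PySem.Dict.mk tc).getD "test_type" "") == "boundary") = true then 2
      else if (PySem.Str.lower ((PySem.Dict.mk tc).getD "test_type" "") == "negative") = true then 2 else 1)
      ∧ (if (PySem.Str.lower ((PySem.Dict.mk tc).getD "test_type" "") == "security") = true then (4:Int)
      else if (PySem.Str.lower ((PySem.Dict.mk tc).getD "test_type" "") == "edge") = true then 3
      else if (PySem.Str.lower ((PySem.Dict.mk tc).getD "test_type" "") == "boundary") = true then 2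
      else if (PySem.Str.lower ((PySem.Dict.mk tc).getD "test_type" "") == "negative") = true then 2 else 1) ≤ 4 := by
    split_ifs <;> omega
  have hborng := boost_mem (PySem.Str.lower ((PySem.Dict.mk tc).getD "test_level" "Unit"))
  exact core _ _ _ _ _ hbrng.1 hbrng.2 (by omega) (by omega)
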